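-- pv_equiv track=rewrite | github.com/GreyStinger/Discord-Pain | discord_pain.py | recombine_words
-- ===== SOURCE A (Python) =====
-- def recombine_words(broken_sentence):
--     """Takes a list and returns a string with two vertical bars before and after each item in the list.
--      Intended to be used with the output of the split_words() function."""
--
--     finished_sentence = f"||"
--     for number in range(len(broken_sentence)):
--         if number == len(broken_sentence) - 1:
--             finished_sentence += f"{broken_sentence[number]}||"
--             break
--         finished_sentence += f"{broken_sentence[number]}||||"
--     return finished_sentence
-- ===== SOURCE B (Python) =====
-- def recombine_words(broken_sentence):
--     """Takes a list and returns a string with two vertical bars before and after each item in the list.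
--      Intended to be used with the output of the split_words() function."""
--     def rec(xs):
--         if len(xs) == 1:
--             return "||" + xs[0] + "||"
--         mid = len(xs) // 2
--         return rec(xs[:mid]) + rec(xs[mid:])
--     return rec(broken_sentence) if broken_sentence else "||"
-- ===== Notes on version B (the rewrite author's own statement) =====
-- stated objective: alternative
-- what changed: Replaces the forward index loop with its last-element branch and break by a divide-and-conquer recursion that splits the list in half, recombines each half and concatenates, with singletons wrapped as '||x||' and the empty list yielding '||'.
import Mathlib
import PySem

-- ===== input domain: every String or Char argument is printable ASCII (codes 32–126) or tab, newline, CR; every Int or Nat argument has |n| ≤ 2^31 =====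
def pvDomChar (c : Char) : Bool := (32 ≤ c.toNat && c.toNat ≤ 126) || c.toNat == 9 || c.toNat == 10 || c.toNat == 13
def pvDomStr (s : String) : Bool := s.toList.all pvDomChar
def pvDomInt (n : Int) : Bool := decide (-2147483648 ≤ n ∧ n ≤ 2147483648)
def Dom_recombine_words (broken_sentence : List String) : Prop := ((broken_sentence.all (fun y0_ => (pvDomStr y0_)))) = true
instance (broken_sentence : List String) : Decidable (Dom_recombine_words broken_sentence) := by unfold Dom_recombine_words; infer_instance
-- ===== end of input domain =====

-- B replaces A's forward index loop (with its last-element branch and break) by a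
-- divide-and-conquer recursion: split the list in half, recombine each half, concatenate;
-- a singleton becomes "||x||" and the empty list yields "||". Objective: alternative.

-- ===== PORT A =====
-- A's loop over range(len(broken_sentence)): each iteration tests 'number == len - 1'
-- (here: the remaining index list is a singleton) and then appends item ++ "||" and breaks;
-- otherwise appends item ++ "||||". State = the accumulator string.
def recombineGo : List String → String → String
  | [], acc => acc
  | [w], acc => acc ++ (w ++ "||")
  | w :: rest, acc => recombineGo rest (acc ++ (w ++ "||||"))

def recombine_words (broken_sentence : List String) : String :=
  recombineGo broken_sentence "||"

-- ===== PORT B =====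
-- Source B's inner rec(xs): if len(xs)==1 return "||"+xs[0]+"||"; else mid=len(xs)//2,
-- rec(xs[:mid]) + rec(xs[mid:]). xs[0] is in range since len=1 (headD); xs[:mid]/xs[mid:]
-- with 0 ≤ mid ≤ len are take/drop (PySem.List.slice_to_natCast/slice_from_natCast);
-- len(xs)//2 on a Nat is Nat division. rec is only ever called on a nonempty list
-- (it would not terminate on []), so the [] branch here is an unreachable totality guard.
def wrapDC (xs : List String) : String :=
  if h1 : xs.length = 1 then
    "||" ++ xs.headD "" ++ "||"
  else if h2 : xs.isEmpty then
    ""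
  else
    let mid := xs.length / 2
    wrapDC (xs.take mid) ++ wrapDC (xs.drop mid)
termination_by xs.length
decreasing_by
  all_goals
    rw [List.isEmpty_iff, ← List.length_eq_zero_iff] at h2
    simp only [List.length_take, List.length_drop]
    omega

-- Source B: return rec(broken_sentence) if broken_sentence else "||"
def recombine_words_alt (broken_sentence : List String) : String :=
  if broken_sentence.isEmpty then "||" else wrapDC broken_sentence

-- ===== PRECONDITION & SPEC =====
def Spec_recombine_words (broken_sentence : List String) (out : String) : Prop := out = recombine_words_alt broken_sentence
instance (broken_sentence : List String) (out : String) : Decidable (Spec_recombine_words broken_sentence out) := by unfold Spec_recombine_words; infer_instance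

-- ===== CLAIM (what is proved, stated in full; the proofs are below) =====
def Claim_equal_recombine_words : Prop := ∀ (broken_sentence : List String), Dom_recombine_words broken_sentence → Spec_recombine_words broken_sentence (recombine_words broken_sentence)

-- ===== LEMMAS AND PROOFS =====
-- the flat value both programs compute: every item wrapped as "||x||", concatenated
def wrapEach : List String → String
  | [] => ""
  | x :: t => "||" ++ x ++ "||" ++ wrapEach t

lemma wrapEach_append (l r : List String) :
    wrapEach (l ++ r) = wrapEach l ++ wrapEach r := by
  induction l with
  | nil => simp [wrapEach]
  | cons x t ih =>
    show wrapEach (x :: (t ++ r)) = _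
    simp only [wrapEach, ih]
    apply String.ext; simp [String.toList_append]

lemma recombineGo_eq (bs : List String) : ∀ acc, bs ≠ [] →
    recombineGo bs (acc ++ "||") = acc ++ wrapEach bs := by
  induction bs with
  | nil => simp
  | cons w rest ih =>
    intro acc _
    cases rest with
    | nil =>
      show (acc ++ "||") ++ (w ++ "||") = acc ++ ("||" ++ w ++ "||" ++ wrapEach [])
      apply String.ext; simp [wrapEach, String.toList_append]
    | cons q t =>
      show recombineGo (q :: t) ((acc ++ "||") ++ (w ++ "||||")) = _
      have h : (acc ++ "||") ++ (w ++ "||||") = (acc ++ ("||" ++ w ++ "||")) ++ "||" := by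
        apply String.ext; simp [String.toList_append]
      rw [h, ih _ (List.cons_ne_nil q t)]
      show _ = acc ++ ("||" ++ w ++ "||" ++ wrapEach (q :: t))
      apply String.ext; simp [String.toList_append]

lemma wrapDC_eq (xs : List String) : xs ≠ [] → wrapDC xs = wrapEach xs := by
  fun_induction wrapDC xs with
  | case1 xs h1 =>
    intro _
    match xs, h1 with
    | [x], _ =>
      show "||" ++ x ++ "||" = wrapEach [x]
      apply String.ext; simp [wrapEach, String.toList_append]
  | case2 xs h1 h2 =>
    intro h; rw [List.isEmpty_iff] at h2; exact absurd h2 h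
  | case3 xs h1 h2 mid ih1 ih2 =>
    intro _
    rw [List.isEmpty_iff, ← List.length_eq_zero_iff] at h2
    rw [ih1 (by simp only [ne_eq, ← List.length_eq_zero_iff, List.length_take]; omega),
        ih2 (by simp only [ne_eq, ← List.length_eq_zero_iff, List.length_drop]; omega),
        ← wrapEach_append, List.take_append_drop]

-- ===== VERDICT (by name: the statement is the Claim_ definition above) =====
theorem recombine_words_spec : Claim_equal_recombine_words := by
  intro bs _
  unfold Spec_recombine_words recombine_words recombine_words_alt
  cases bs with
  | nil => simp [recombineGo]
  | cons w rest =>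
    have h := recombineGo_eq (w :: rest) "" (List.cons_ne_nil w rest)
    simp only [String.empty_append] at h
    simp only [List.isEmpty_cons, if_false, Bool.false_eq_true]
    rw [h]
    exact (wrapDC_eq (w :: rest) (List.cons_ne_nil w rest)).symm
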